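-- pv_equiv track=rewrite | github.com/jazzyalex/agent-sessions | tools/release/sparkle_release_notes.py | _split_headings
-- ===== SOURCE A (Python) =====
-- from typing import Dict, List, Optional, Tuple
--
-- def _split_headings(section_body: str) -> List[Tuple[Optional[str], List[str]]]:
--     """
--     Splits a section body into (heading, lines) chunks where heading is the
--     "### ..." title (without ###). Lines before the first heading use None.
--     """
--     chunks: List[Tuple[Optional[str], List[str]]] = []
--     current_heading: Optional[str] = None
--     current_lines: List[str] = []
--
--     for raw in section_body.splitlines():
--         line = raw.rstrip("\n")
--         if line.startswith("### "):
--             if current_heading is not None or current_lines: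
--                 chunks.append((current_heading, current_lines))
--             current_heading = line.removeprefix("### ").strip()
--             current_lines = []
--         else:
--             current_lines.append(line)
--
--     if current_heading is not None or current_lines:
--         chunks.append((current_heading, current_lines))
--     return chunks
-- ===== SOURCE B (Python) =====
-- from typing import Dict, List, Optional, Tuple
--
--
-- def _split_at_heading(lines: List[str]) -> Tuple[List[str], Optional[str], List[str]]:
--     k = next((i for i, l in enumerate(lines) if l.startswith("### ")), None)
--     if k is None:
--         return lines, None, []
--     return lines[:k], lines[k], lines[k + 1:]
--
--
-- def _tail_chunks(head: str, rest: List[str]) -> List[Tuple[Optional[str], List[str]]]: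
--     body, nxt, rest2 = _split_at_heading(rest)
--     chunk = (head.removeprefix("### ").strip(), body)
--     if nxt is None:
--         return [chunk]
--     return [chunk] + _tail_chunks(nxt, rest2)
--
--
-- def _split_headings(section_body: str) -> List[Tuple[Optional[str], List[str]]]:
--     lines = section_body.splitlines()
--     pre, head, rest = _split_at_heading(lines)
--     chunks: List[Tuple[Optional[str], List[str]]] = [(None, pre)] if pre else []
--     if head is None:
--         return chunks
--     return chunks + _tail_chunks(head, rest)
-- ===== Notes on version B (the rewrite author's own statement) =====
-- stated objective: alternative
-- what changed: A carries a (current heading, pending lines) accumulator through one fold with an emit-guard at each heading and at the end; B instead repeatedly splits the line list at the next '### ' heading (find-index + slice) and builds the chunks by recursion on the tail segments.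
import Mathlib
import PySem

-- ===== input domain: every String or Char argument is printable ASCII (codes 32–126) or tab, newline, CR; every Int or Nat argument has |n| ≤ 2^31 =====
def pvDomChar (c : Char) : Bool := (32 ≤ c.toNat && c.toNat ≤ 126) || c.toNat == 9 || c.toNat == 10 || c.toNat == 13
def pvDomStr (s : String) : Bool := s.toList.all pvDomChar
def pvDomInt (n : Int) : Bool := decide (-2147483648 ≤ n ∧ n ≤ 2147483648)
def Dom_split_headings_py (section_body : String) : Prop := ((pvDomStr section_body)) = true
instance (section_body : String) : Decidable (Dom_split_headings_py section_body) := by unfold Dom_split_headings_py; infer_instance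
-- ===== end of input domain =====

-- B replaces A's single accumulator scan (current heading + pending lines carried through a fold)
-- by a split-at-next-heading recursion; objective: alternative decomposition, same cost.

-- ===== PORT A =====
-- raw.rstrip("\n"): hand port, exact — drops the trailing run of '\n' characters
def shA_rstripNl (s : String) : String :=
  String.ofList ((s.toList.reverse.dropWhile (· == '\n')).reverse)

-- s.removeprefix(p): hand port, exact — drops p iff it is a prefix
def shRemoveprefix (s p : String) : String :=
  if PySem.Str.startswith s p then String.ofList (s.toList.drop p.toList.length) else s

-- the duplicated guard 'if current_heading is not None or current_lines: chunks.append(...)'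
def shA_finish (st : List (Option String × List String) × Option String × List String) :
    List (Option String × List String) :=
  if st.2.1.isSome || !st.2.2.isEmpty then st.1 ++ [(st.2.1, st.2.2)] else st.1

def shA_step (st : List (Option String × List String) × Option String × List String)
    (raw : String) : List (Option String × List String) × Option String × List String :=
  let line := shA_rstripNl raw
  if PySem.Str.startswith line "### " then
    (shA_finish st, some (PySem.Str.strip (shRemoveprefix line "### ")), [])
  else (st.1, st.2.1, st.2.2 ++ [line])

def split_headings_py (section_body : String) : List (Option String × List String) :=
  shA_finish ((PySem.Str.splitlines section_body).foldl shA_step ([], none, []))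

-- ===== PORT B =====
-- next((i for i,l in enumerate(lines) if l.startswith("### ")), None) = findIdx?;
-- lines[:k] / lines[k+1:] with 0 ≤ k < len(lines) are take/drop (PySem.List.slice_natCast)
def shB_splitAtHeading (lines : List String) :
    List String × Option String × List String :=
  match lines.findIdx? (fun l => PySem.Str.startswith l "### ") with
  | none => (lines, none, [])
  | some k => (lines.take k, lines[k]?, lines.drop (k + 1))

-- termination helper for shB_tail (cited by decreasing_by)
theorem shB_split_rest_lt (lines body : List String) (nxt : String) (rest2 : List String)
    (h : shB_splitAtHeading lines = (body, some nxt, rest2)) : rest2.length < lines.length := by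
  unfold shB_splitAtHeading at h
  split at h
  · simp at h
  · rename_i k hf
    have hk : k < lines.length := (List.findIdx?_eq_some_iff_findIdx_eq.mp hf).1
    simp only [Prod.mk.injEq] at h
    obtain ⟨-, -, h3⟩ := h
    subst h3
    simp [List.length_drop]
    omega

def shB_tail (head : String) (rest : List String) : List (Option String × List String) :=
  match h : shB_splitAtHeading rest with
  | (body, none, _) => [(some (PySem.Str.strip (shRemoveprefix head "### ")), body)]
  | (body, some nxt, rest2) =>
      (some (PySem.Str.strip (shRemoveprefix head "### ")), body) :: shB_tail nxt rest2
termination_by rest.length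
decreasing_by exact shB_split_rest_lt _ _ _ _ h

def split_headings_py_alt (section_body : String) : List (Option String × List String) :=
  match shB_splitAtHeading (PySem.Str.splitlines section_body) with
  | (pre, none, _) => if pre.isEmpty then [] else [((none : Option String), pre)]
  | (pre, some head, rest) =>
      (if pre.isEmpty then [] else [((none : Option String), pre)]) ++ shB_tail head rest

-- ===== PRECONDITION & SPEC =====
def Spec_split_headings_py (section_body : String) (out : List (Option String × List String)) : Prop := out = split_headings_py_alt section_body
instance (section_body : String) (out : List (Option String × List String)) : Decidable (Spec_split_headings_py section_body out) := by unfold Spec_split_headings_py; infer_instance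

-- ===== CLAIM (what is proved, stated in full; the proofs are below) =====
def Claim_equal_split_headings_py : Prop := ∀ (section_body : String), Dom_split_headings_py section_body → Spec_split_headings_py section_body (split_headings_py section_body)

-- ===== LEMMAS AND PROOFS =====

-- every line produced by splitlines is free of break characters
theorem go_no_break (isB : Char → Bool) (s cur : List Char) (acc : List (List Char))
    (hcur : ∀ c ∈ cur, isB c = false)
    (hacc : ∀ x ∈ acc, ∀ c ∈ x, isB c = false) :
    ∀ x ∈ PySem.Chars.splitlines.go isB s cur acc, ∀ c ∈ x, isB c = false := by
  induction s, cur, acc using PySem.Chars.splitlines.go.induct isB with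
  | case1 cur acc hce =>
    intro x hx c hc
    rw [PySem.Chars.splitlines.go.eq_1, if_pos hce, List.mem_reverse] at hx
    exact hacc x hx c hc
  | case2 cur acc hce =>
    intro x hx c hc
    rw [PySem.Chars.splitlines.go.eq_1, if_neg hce, List.mem_reverse, List.mem_cons] at hx
    rcases hx with rfl | hx
    · exact hcur c (List.mem_reverse.mp hc)
    · exact hacc x hx c hc
  | case3 rest cur acc ih =>
    rw [PySem.Chars.splitlines.go.eq_2]
    refine ih (by simp) ?_
    intro x hx
    rcases List.mem_cons.mp hx with rfl | hx
    · intro c hc; exact hcur c (List.mem_reverse.mp hc)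
    · exact hacc x hx
  | case4 c rest cur acc hne hb ih =>
    rw [PySem.Chars.splitlines.go.eq_3 isB cur acc c rest hne, if_pos hb]
    refine ih (by simp) ?_
    intro x hx
    rcases List.mem_cons.mp hx with rfl | hx
    · intro d hd; exact hcur d (List.mem_reverse.mp hd)
    · exact hacc x hx
  | case5 c rest cur acc hne hb ih =>
    rw [PySem.Chars.splitlines.go.eq_3 isB cur acc c rest hne, if_neg hb]
    refine ih ?_ hacc
    intro d hd
    rcases List.mem_cons.mp hd with rfl | hd
    · exact Bool.not_eq_true _ |>.mp hb
    · exact hcur d hd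

theorem rstripNl_splitlines (s : String) :
    ∀ l ∈ PySem.Str.splitlines s, shA_rstripNl l = l := by
  intro l hl
  simp only [PySem.Str.splitlines, List.mem_map] at hl
  obtain ⟨cs, hcs, rfl⟩ := hl
  unfold PySem.Chars.splitlines at hcs
  have hnb := go_no_break _ s.toList [] [] (by simp) (by simp) cs hcs
  have hnn : ∀ c ∈ cs, ¬ c = '\n' := by
    intro c hc he
    have := hnb c hc
    subst he
    simp at this
  unfold shA_rstripNl
  have hdw : (String.ofList cs).toList.reverse.dropWhile (· == '\n') = cs.reverse := by
    have ht : (String.ofList cs).toList = cs := by simp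
    rw [ht]
    cases hrev : cs.reverse with
    | nil => simp
    | cons d ds =>
      have hd : d ∈ cs := by
        rw [← List.mem_reverse, hrev]; exact List.mem_cons_self
      rw [List.dropWhile_cons]
      simp [hnn d hd]
  rw [hdw]
  simp

theorem shA_finish_append (chunks : List (Option String × List String))
    (h : Option String) (cur : List String) :
    shA_finish (chunks, h, cur) = chunks ++ shA_finish ([], h, cur) := by
  unfold shA_finish
  dsimp only
  split <;> simp

theorem shA_step_split (chunks : List (Option String × List String))
    (h : Option String) (cur : List String) (l : String) :
    shA_step (chunks, h, cur) l =
      (chunks ++ (shA_step ([], h, cur) l).1,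
       (shA_step ([], h, cur) l).2.1, (shA_step ([], h, cur) l).2.2) := by
  unfold shA_step
  dsimp only
  split
  · rw [shA_finish_append]
  · simp

-- chunks accumulated by the fold only grow by appending
theorem foldA_chunks (lines : List String)
    (chunks : List (Option String × List String)) (h : Option String) (cur : List String) :
    shA_finish (lines.foldl shA_step (chunks, h, cur)) =
      chunks ++ shA_finish (lines.foldl shA_step ([], h, cur)) := by
  induction lines generalizing chunks h cur with
  | nil => simpa using shA_finish_append chunks h cur
  | cons l ls ih =>
    rw [List.foldl_cons, List.foldl_cons, shA_step_split]
    rcases hstep : shA_step ([], h, cur) l with ⟨c0, t1, t2⟩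
    dsimp only
    rw [ih, ih c0]
    simp

-- main invariant: A's fold from state (h, cur) equals B's split-at-heading decomposition
theorem shB_split_cons_false (l : String) (ls : List String)
    (hsw : PySem.Str.startswith l "### " = false) :
    shB_splitAtHeading (l :: ls) =
      (l :: (shB_splitAtHeading ls).1,
       (shB_splitAtHeading ls).2.1, (shB_splitAtHeading ls).2.2) := by
  have hsw2 : PySem.Chars.startswith l.toList ['#', '#', '#', ' '] = false := by
    simpa using hsw
  unfold shB_splitAtHeading
  rw [List.findIdx?_cons]
  cases hf : List.findIdx? (fun l => PySem.Chars.startswith l.toList ['#', '#', '#', ' ']) ls with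
  | none => simp [hsw2, hf]
  | some k => simp [hsw2, hf]

theorem shB_split_cons_true (l : String) (ls : List String)
    (hsw : PySem.Str.startswith l "### " = true) :
    shB_splitAtHeading (l :: ls) = ([], some l, ls) := by
  have hsw2 : PySem.Chars.startswith l.toList ['#', '#', '#', ' '] = true := by
    simpa using hsw
  unfold shB_splitAtHeading
  rw [List.findIdx?_cons]
  simp [hsw2]

theorem main_inv (lines : List String) (hnl : ∀ l ∈ lines, shA_rstripNl l = l)
    (h : Option String) (cur : List String) :
    shA_finish (lines.foldl shA_step ([], h, cur)) =
      (match shB_splitAtHeading lines with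
       | (pre, none, _) =>
          if h.isSome || !(cur ++ pre).isEmpty then [(h, cur ++ pre)] else []
       | (pre, some nxt, rest) =>
          (if h.isSome || !(cur ++ pre).isEmpty then [(h, cur ++ pre)] else []) ++
            shB_tail nxt rest) := by
  induction lines generalizing h cur with
  | nil =>
    rw [show shB_splitAtHeading [] = ([], none, []) from by simp [shB_splitAtHeading]]
    simp [shA_finish]
  | cons l ls ih =>
    have hl : shA_rstripNl l = l := hnl l (by simp)
    have hls : ∀ x ∈ ls, shA_rstripNl x = x := fun x hx => hnl x (by simp [hx])
    rw [List.foldl_cons]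
    by_cases hsw : PySem.Str.startswith l "### " = true
    · have hsw2 : PySem.Chars.startswith l.toList ['#', '#', '#', ' '] = true := by
        simpa using hsw
      have hstep : shA_step ([], h, cur) l =
          (shA_finish ([], h, cur),
           some (PySem.Str.strip (shRemoveprefix l "### ")), []) := by
        simp [shA_step, hl, hsw2, shRemoveprefix]
      rw [hstep, foldA_chunks, ih hls, shB_split_cons_true l ls hsw]
      dsimp only
      rw [shB_tail.eq_def]
      cases hsp : shB_splitAtHeading ls with
      | mk pre t =>
        cases t with
        | mk h2 r2 => cases h2 <;> simp [shA_finish]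
    · rw [Bool.not_eq_true] at hsw
      have hsw2 : PySem.Chars.startswith l.toList ['#', '#', '#', ' '] = false := by
        simpa using hsw
      have hstep : shA_step ([], h, cur) l = ([], h, cur ++ [l]) := by
        simp [shA_step, hl, hsw2]
      rw [hstep, ih hls, shB_split_cons_false l ls hsw]
      cases hsp : shB_splitAtHeading ls with
      | mk pre t =>
        cases t with
        | mk h2 r2 => cases h2 <;> simp

-- ===== VERDICT (by name: the statement is the Claim_ definition above) =====
theorem split_headings_py_spec : Claim_equal_split_headings_py := by
  intro s _
  unfold Spec_split_headings_py split_headings_py split_headings_py_alt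
  rw [main_inv _ (rstripNl_splitlines s) none []]
  cases hsp : shB_splitAtHeading (PySem.Str.splitlines s) with
  | mk pre t =>
    cases t with
    | mk h? rest =>
      cases h? <;> cases pre <;> simp
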